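-- pv_equiv track=rewrite | github.com/miczho/competitive-coding | codeforces-1514-c.py | prodOneModN
-- ===== SOURCE A (Python) =====
-- def gcd(a, b):
--     while b != 0: a, b = b, a%b
--     return a
--
-- def prodOneModN(n):
--     ans = set((i for i in range(1, n)))
--     total = 1
--     for i in range(2, n):
--         if gcd(i, n) != 1:
--             ans.remove(i)
--         else:
--             total *= i
--             total %= n
--
--     if total != 1:
--         ans.remove(total)
--     return [[len(ans)], sorted(list(ans))]
-- ===== SOURCE B (Python) =====
-- def prodOneModN(n):
--     # Divisor sieve: mark every multiple of each divisor d (2 <= d <= n) of n as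
--     # non-coprime; survivors are the units mod n.  Then fold their product mod n
--     # and drop it from the (already sorted) survivor list when it is not 1.
--     if n <= 1:
--         return [[0], []]
--     coprime = [True] * n
--     coprime[0] = False
--     for d in range(2, n + 1):
--         if n % d == 0:
--             for k in range(0, n, d):
--                 coprime[k] = False
--     units = [i for i in range(1, n) if coprime[i]]
--     total = 1
--     for u in units:
--         total = total * u % n
--     if total != 1:
--         units.remove(total)
--     return [[len(units)], units]
-- ===== Notes on version B (the rewrite author's own statement) =====
-- stated objective: faster
-- what changed: A tests every residue with a hand-written gcd loop while deleting non-units from a set; B instead sieves: it marks the multiples of every divisor of n in a boolean array, filters the surviving units in one pass, folds their product mod n, and drops that product from the already-sorted survivor list.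
import Mathlib
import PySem

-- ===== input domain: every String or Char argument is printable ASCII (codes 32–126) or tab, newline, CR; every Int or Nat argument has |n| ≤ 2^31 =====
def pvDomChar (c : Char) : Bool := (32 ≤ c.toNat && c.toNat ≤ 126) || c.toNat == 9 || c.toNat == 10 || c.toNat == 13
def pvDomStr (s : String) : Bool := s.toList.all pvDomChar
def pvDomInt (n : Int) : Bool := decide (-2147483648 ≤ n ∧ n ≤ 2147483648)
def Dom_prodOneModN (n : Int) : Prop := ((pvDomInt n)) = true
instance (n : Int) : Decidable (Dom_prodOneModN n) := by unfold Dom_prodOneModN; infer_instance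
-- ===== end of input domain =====

-- B replaces A's per-element gcd test by a divisor sieve over 0..n-1 and folds the
-- product over the surviving (already sorted) list directly (measured faster at large n).

-- ===== PORT A =====

-- termination of Python's 'while b != 0: a, b = b, a % b' (|a % b| < |b| for b ≠ 0)
theorem pyGcd_term (a b : Int) (hb : ¬ b = 0) : (PySem.Int.mod a b).natAbs < b.natAbs := by
  rcases lt_or_gt_of_ne hb with h | h
  · have := PySem.Int.mod_neg_bounds a h
    omega
  · have h1 := PySem.Int.mod_nonneg a h
    have h2 := PySem.Int.mod_lt a h
    omega

-- the helper 'gcd' of A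
def pyGcd (a b : Int) : Int :=
  if h : b = 0 then a else pyGcd b (PySem.Int.mod a b)
termination_by b.natAbs
decreasing_by exact pyGcd_term a b h

def prodOneModN (n : Int) : List (List Int) :=
  let ans0 : PySem.Set Int := PySem.Set.ofList (PySem.List.pyRange 1 n 1)
  let st : PySem.Set Int × Int :=
    (PySem.List.pyRange 2 n 1).foldl
      (fun (st : PySem.Set Int × Int) i =>
        if pyGcd i n ≠ 1 then
          -- ans.remove(i): i is present in every reachable state (see the loop
          -- invariant Aloop below), so the KeyError branch (remove? = none) is dead
          ((PySem.Set.remove? st.1 i).getD st.1, st.2)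
        else
          (st.1, PySem.Int.mod (st.2 * i) n))
      (ans0, 1)
  let ans : PySem.Set Int :=
    if st.2 ≠ 1 then (PySem.Set.remove? st.1 st.2).getD st.1 else st.1
  [[PySem.List.len ans], PySem.List.sorted ans (fun x => x)]

-- ===== PORT B =====

-- inner sieve loop: 'for k in range(0, n, d): coprime[k] = False'
def sieveMark (acc : List Bool) (n d : Int) : List Bool :=
  (PySem.List.pyRange 0 n d).foldl (fun a k => PySem.List.pySetD a k false) acc

def prodOneModN_alt (n : Int) : List (List Int) :=
  if n ≤ 1 then [[0], []]
  else
    let cop0 : List Bool := PySem.List.pySetD (PySem.List.pyRepeat [true] n) 0 false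
    let cop : List Bool :=
      (PySem.List.pyRange 2 (n + 1) 1).foldl
        (fun acc d => if PySem.Int.mod n d = 0 then sieveMark acc n d else acc) cop0
    let units : List Int :=
      (PySem.List.pyRange 1 n 1).filter (fun i => PySem.List.pyGetD cop i false)
    let total : Int := units.foldl (fun t u => PySem.Int.mod (t * u) n) 1
    -- units.remove(total): total is present whenever total ≠ 1, so the ValueError
    -- branch (remove? = none) is dead
    let units' : List Int :=
      if total ≠ 1 then (PySem.List.remove? units total).getD units else units
    [[PySem.List.len units'], units']

-- ===== PRECONDITION & SPEC =====
def Spec_prodOneModN (n : Int) (out : List (List Int)) : Prop := out = prodOneModN_alt n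
instance (n : Int) (out : List (List Int)) : Decidable (Spec_prodOneModN n out) := by unfold Spec_prodOneModN; infer_instance

-- ===== CLAIM (what is proved, stated in full; the proofs are below) =====
def Claim_equal_prodOneModN : Prop := ∀ (n : Int), Dom_prodOneModN n → Spec_prodOneModN n (prodOneModN n)

-- ===== LEMMAS AND PROOFS =====

-- list.remove on a duplicate-free list removes exactly the matching element
theorem remove?_nodup (l : List Int) (a : Int) (h : l.Nodup) (hm : a ∈ l) :
    PySem.List.remove? l a = some (l.filter (fun y => y != a)) := by
  induction l with
  | nil => simp at hm
  | cons x t ih =>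
    by_cases hx : x = a
    · subst hx
      rw [PySem.List.remove?]
      simp [List.idxOf?_cons]
      have hn : x ∉ t := (List.nodup_cons.mp h).1
      rw [List.filter_eq_self.mpr]
      intro y hy
      simp only [bne_iff_ne, ne_eq]
      rintro rfl; exact hn hy
    · have hmt : a ∈ t := by
        rcases List.mem_cons.mp hm with h1 | h1
        · exact absurd h1.symm hx
        · exact h1
      have := ih (List.nodup_cons.mp h).2 hmt
      rw [PySem.List.remove?] at this ⊢
      rcases ho : List.idxOf? a t with _ | k
      · rw [ho] at this; simp at this
      · rw [ho] at this
        simp only [Option.map_some, Option.some.injEq] at this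
        simp [List.idxOf?_cons, hx, ho, List.eraseIdx_cons_succ, this,
          (by simpa using hx : (x != a) = true)]

-- A's hand-written gcd loop computes Int.gcd on nonnegative arguments
theorem pyGcd_eq (a b : Int) (ha : 0 ≤ a) (hb : 0 ≤ b) : pyGcd a b = (Int.gcd a b : Int) := by
  rw [pyGcd]
  split
  · rename_i h
    subst h
    simp [Int.gcd, Int.natAbs_of_nonneg ha]
  · rename_i h
    have hbpos : 0 < b := lt_of_le_of_ne hb (Ne.symm h)
    rw [PySem.Int.mod_eq_emod_of_pos hbpos]
    rw [pyGcd_eq b (a % b) hb (Int.emod_nonneg a h)]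
    rw [Int.gcd_comm b, Int.gcd_emod]
termination_by b.natAbs
decreasing_by
  rename_i h
  have h1 := Int.emod_nonneg a h
  have h2 := Int.emod_lt_of_pos a (lt_of_le_of_ne hb (Ne.symm h))
  omega

-- coprimality to n ↔ no d with 2 ≤ d ≤ n divides both (the sieve's criterion)
theorem gcd_one_iff_no_divisor (i n : Int) (hi : 1 ≤ i) (hn : 0 < n) :
    Int.gcd i n = 1 ↔ ¬ ∃ d, 2 ≤ d ∧ d ≤ n ∧ d ∣ n ∧ d ∣ i := by
  constructor
  · rintro hg ⟨d, hd2, _, hdn, hdi⟩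
    have hcast : ((d.toNat : Int)) = d := Int.toNat_of_nonneg (by omega)
    have : d.toNat ∣ Int.gcd i n := Int.dvd_gcd (hcast ▸ hdi) (hcast ▸ hdn)
    rw [hg] at this
    have := Nat.le_of_dvd one_pos this
    omega
  · intro h
    by_contra hg
    have hg0 : Int.gcd i n ≠ 0 := by
      intro h0
      have := Int.gcd_eq_zero_iff.mp h0
      omega
    refine h ⟨(Int.gcd i n : Int), ?_, ?_, Int.gcd_dvd_right i n, Int.gcd_dvd_left i n⟩
    · have : 2 ≤ Int.gcd i n := by omega
      exact_mod_cast this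
    · exact Int.le_of_dvd hn (Int.gcd_dvd_right i n)

-- length is preserved by the marking fold
theorem setAll_length (l : List Int) (acc : List Bool) :
    (l.foldl (fun a k => PySem.List.pySetD a k false) acc).length = acc.length := by
  induction l generalizing acc with
  | nil => rfl
  | cons k t ih => simp [List.foldl_cons, ih, PySem.List.length_pySetD]

-- marking fold: index i reads false iff i occurs in the marked index list
theorem setAll_getElem? (l : List Int) (acc : List Bool)
    (hl : ∀ k ∈ l, 0 ≤ k ∧ k < (acc.length : Int)) (i : Nat) :
    (l.foldl (fun a k => PySem.List.pySetD a k false) acc)[i]?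
      = if (i : Int) ∈ l then some false else acc[i]? := by
  induction l generalizing acc with
  | nil => simp
  | cons k t ih =>
    have hk := hl k (List.mem_cons_self ..)
    rw [List.foldl_cons, ih]
    · rw [PySem.List.pySetD_of_nonneg acc false hk.1, List.getElem?_set]
      by_cases hmem : (i : Int) ∈ t
      · simp [hmem]
      · have hco : ((i : Int) ∈ k :: t) ↔ k.toNat = i := by
          simp [hmem]
          omega
        by_cases he : k.toNat = i
        · have : i < acc.length := by omega
          simp [hmem, hco, he, this]
        · simp [hmem, hco, he]
    · intro k' hk'
      have := hl k' (List.mem_cons_of_mem _ hk')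
      rwa [PySem.List.pySetD_of_nonneg acc false hk.1, List.length_set]

-- outer sieve loop: index i (0 ≤ i < n) reads false iff some divisor of n in D divides i
theorem sieve_getElem? (n : Int) (D : List Int) (acc : List Bool)
    (hacc : (acc.length : Int) = n) (hd : ∀ d ∈ D, 0 < d) (i : Nat) (hi : (i : Int) < n) :
    (D.foldl (fun acc d => if PySem.Int.mod n d = 0 then sieveMark acc n d else acc) acc)[i]?
      = if ∃ d ∈ D, PySem.Int.mod n d = 0 ∧ d ∣ (i : Int) then some false else acc[i]? := by
  induction D generalizing acc with
  | nil => simp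
  | cons d D ih =>
    have hdp := hd d (List.mem_cons_self ..)
    have hcons : (∃ d' ∈ d :: D, PySem.Int.mod n d' = 0 ∧ d' ∣ (i:Int))
        ↔ ((PySem.Int.mod n d = 0 ∧ d ∣ (i:Int)) ∨ ∃ d' ∈ D, PySem.Int.mod n d' = 0 ∧ d' ∣ (i:Int)) := by
      simp
    rw [List.foldl_cons]
    by_cases hmod : PySem.Int.mod n d = 0
    · rw [if_pos hmod, ih]
      · have hmem_iff : ((i:Int) ∈ PySem.List.pyRange 0 n d) ↔ d ∣ (i:Int) := by
          rw [PySem.List.mem_pyRange_iff_of_pos hdp]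
          constructor
          · exact fun h => by simpa using h.2.2
          · exact fun h => ⟨by positivity, hi, by simpa using h⟩
        have hmark : (sieveMark acc n d)[i]? = if d ∣ (i : Int) then some false else acc[i]? := by
          rw [sieveMark, setAll_getElem?]
          · simp only [hmem_iff]
          · intro k hk
            rw [PySem.List.mem_pyRange_iff_of_pos hdp] at hk
            omega
        rw [hmark, if_congr hcons rfl rfl]
        by_cases hE : ∃ d' ∈ D, PySem.Int.mod n d' = 0 ∧ d' ∣ (i:Int)
        · rw [if_pos hE, if_pos (Or.inr hE)]
        · rw [if_neg hE]
          by_cases h2 : d ∣ (i:Int)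
          · rw [if_pos h2, if_pos (Or.inl ⟨hmod, h2⟩)]
          · rw [if_neg h2, if_neg (fun h => h.elim (fun hm => h2 hm.2) hE)]
      · rwa [sieveMark, setAll_length]
      · exact fun d' hd' => hd d' (List.mem_cons_of_mem _ hd')
    · rw [if_neg hmod, ih acc hacc (fun d' hd' => hd d' (List.mem_cons_of_mem _ hd')),
        if_congr hcons rfl rfl]
      by_cases hE : ∃ d' ∈ D, PySem.Int.mod n d' = 0 ∧ d' ∣ (i:Int)
      · rw [if_pos hE, if_pos (Or.inr hE)]
      · rw [if_neg hE, if_neg (fun h => h.elim (fun hm => hmod hm.1) hE)]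

-- invariant of A's removal loop after processing 2,…,j-1
theorem Aloop (n : Int) (hn : 2 ≤ n) (j : Int) (h2 : 2 ≤ j) (hj : j ≤ n) :
    (PySem.List.pyRange 2 j 1).foldl
      (fun (st : PySem.Set Int × Int) i =>
        if pyGcd i n ≠ 1 then ((PySem.Set.remove? st.1 i).getD st.1, st.2)
        else (st.1, PySem.Int.mod (st.2 * i) n))
      (PySem.List.pyRange 1 n 1, 1)
    = ((PySem.List.pyRange 1 n 1).filter (fun i => decide (i < j → Int.gcd i n = 1)),
       ((PySem.List.pyRange 2 j 1).filter (fun i => decide (Int.gcd i n = 1))).foldl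
         (fun t u => PySem.Int.mod (t * u) n) 1) := by
  induction j, h2 using Int.le_induction with
  | base =>
    rw [PySem.List.pyRange_one_eq_nil le_rfl]
    simp only [List.foldl_nil, List.filter_nil, Prod.mk.injEq]
    refine ⟨(List.filter_eq_self.mpr ?_).symm, trivial⟩
    intro i hi
    rw [PySem.List.mem_pyRange_one] at hi
    simp only [decide_eq_true_eq]
    intro hlt
    have : i = 1 := by omega
    subst this
    exact Int.one_gcd
  | succ j h2 ih =>
    have hjn : j ≤ n := by omega
    have hjlt : j < n := by omega
    rw [PySem.List.pyRange_one_succ_right (by omega : (2:Int) ≤ j), List.foldl_append, ih hjn]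
    have hg' : pyGcd j n = (Int.gcd j n : Int) := pyGcd_eq j n (by omega) (by omega)
    by_cases hg : Int.gcd j n = 1
    · have hcond : ¬ (pyGcd j n ≠ 1) := by rw [hg', hg]; simp
      simp only [List.foldl_cons, List.foldl_nil, if_neg hcond, Prod.mk.injEq]
      refine ⟨List.filter_congr ?_, ?_⟩
      · intro i hi
        rw [PySem.List.mem_pyRange_one] at hi
        simp only [decide_eq_decide]
        constructor
        · intro h hlt
          by_cases hij : i = j
          · subst hij; exact hg
          · exact h (by omega)
        · intro h hlt
          exact h (by omega)
      · rw [List.filter_append, List.foldl_append]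
        simp [hg]
    · have hcond : pyGcd j n ≠ 1 := by
        rw [hg']
        exact_mod_cast fun h => hg (by exact_mod_cast h)
      simp only [List.foldl_cons, List.foldl_nil, if_pos hcond, Prod.mk.injEq]
      have hjmem : j ∈ (PySem.List.pyRange 1 n 1).filter (fun i => decide (i < j → Int.gcd i n = 1)) := by
        rw [List.mem_filter, PySem.List.mem_pyRange_one]
        refine ⟨⟨by omega, hjlt⟩, by simp⟩
      rw [PySem.Set.remove?_of_mem hjmem]
      simp only [Option.getD_some]
      refine ⟨?_, ?_⟩
      · rw [PySem.Set.discard, List.filter_filter]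
        refine List.filter_congr ?_
        intro i hi
        rw [PySem.List.mem_pyRange_one] at hi
        by_cases hij : i = j
        · subst hij
          simp [hg]
        · have h1 : (!i == j) = true := by simpa using hij
          rw [h1, Bool.true_and, decide_eq_decide]
          constructor
          · intro h hlt; exact h (by omega)
          · intro h hlt; exact h (by omega)
      · rw [List.filter_append, List.foldl_append]
        simp [hg]

-- B's sieve-driven filter selects exactly the residues coprime to n
theorem units_char (n : Int) (hn : 2 ≤ n) :
    (PySem.List.pyRange 1 n 1).filter (fun i => PySem.List.pyGetD
       ((PySem.List.pyRange 2 (n + 1) 1).foldl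
          (fun acc d => if PySem.Int.mod n d = 0 then sieveMark acc n d else acc)
          (PySem.List.pySetD (PySem.List.pyRepeat [true] n) 0 false)) i false)
    = (PySem.List.pyRange 1 n 1).filter (fun i => decide (Int.gcd i n = 1)) := by
  refine List.filter_congr ?_
  intro i hi
  rw [PySem.List.mem_pyRange_one] at hi
  have h0 : (0:Int) ≤ i := by omega
  have hlen0 : (PySem.List.pyRepeat [true] n).length = n.toNat := by
    rw [PySem.List.pyRepeat_singleton, List.length_replicate]
  have hlen : ((PySem.List.pySetD (PySem.List.pyRepeat [true] n) 0 false).length : Int) = n := by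
    rw [PySem.List.length_pySetD, hlen0]
    omega
  rw [PySem.List.pyGetD_of_nonneg _ _ h0, List.getD_eq_getElem?_getD]
  have hcast : ((i.toNat : Nat) : Int) = i := Int.toNat_of_nonneg h0
  rw [sieve_getElem? n _ _ hlen
        (fun d hd => by rw [PySem.List.mem_pyRange_one] at hd; omega)
        i.toNat (by omega)]
  have hbase : (PySem.List.pySetD (PySem.List.pyRepeat [true] n) 0 false)[i.toNat]? = some true := by
    rw [PySem.List.pySetD_of_nonneg _ false le_rfl, List.getElem?_set]
    simp only [Int.toNat_zero]
    have : ¬ ((0:Nat) = i.toNat) := by omega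
    rw [if_neg this, PySem.List.pyRepeat_singleton]
    rw [List.getElem?_replicate, if_pos (by omega)]
  have hiff : (∃ d ∈ PySem.List.pyRange 2 (n + 1) 1, PySem.Int.mod n d = 0 ∧ d ∣ ((i.toNat : Nat) : Int))
      ↔ ¬ Int.gcd i n = 1 := by
    rw [hcast, gcd_one_iff_no_divisor i n (by omega) (by omega), not_not]
    constructor
    · rintro ⟨d, hd, hm, hdi⟩
      rw [PySem.List.mem_pyRange_one] at hd
      exact ⟨d, hd.1, by omega, (PySem.Int.mod_eq_zero_iff_dvd n d).mp hm, hdi⟩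
    · rintro ⟨d, h2, hdn, hdvd, hdi⟩
      exact ⟨d, by rw [PySem.List.mem_pyRange_one]; omega,
        (PySem.Int.mod_eq_zero_iff_dvd n d).mpr hdvd, hdi⟩
  by_cases hg : Int.gcd i n = 1
  · rw [if_neg (by rw [hiff]; exact not_not_intro hg), hbase]
    simp [hg]
  · rw [if_pos (hiff.mpr hg)]
    simp [hg]

-- both products fold over the same coprime residues (the extra leading 1 is inert)
theorem totals_eq (n : Int) (hn : 2 ≤ n) :
    ((PySem.List.pyRange 1 n 1).filter (fun i => decide (Int.gcd i n = 1))).foldl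
       (fun t u => PySem.Int.mod (t * u) n) 1
    = ((PySem.List.pyRange 2 n 1).filter (fun i => decide (Int.gcd i n = 1))).foldl
       (fun t u => PySem.Int.mod (t * u) n) 1 := by
  rw [PySem.List.pyRange_one_cons (by omega : (1:Int) < n),
    List.filter_cons_of_pos (by simp [Int.one_gcd]), List.foldl_cons]
  congr 1
  rw [one_mul, PySem.Int.mod_eq_emod_of_pos (by omega), Int.emod_eq_of_lt (by omega) (by omega)]

-- ===== VERDICT (by name: the statement is the Claim_ definition above) =====
theorem prodOneModN_spec : Claim_equal_prodOneModN := by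
  intro n _
  unfold Spec_prodOneModN
  by_cases hn1 : n ≤ 1
  · rw [prodOneModN, prodOneModN_alt, if_pos hn1,
      PySem.List.pyRange_one_eq_nil (by omega : n ≤ (1:Int)),
      PySem.List.pyRange_one_eq_nil (by omega : n ≤ (2:Int))]
    rfl
  · have hn : 2 ≤ n := by omega
    rw [prodOneModN, prodOneModN_alt, if_neg hn1]
    simp only
    rw [PySem.Set.ofList_eq_self_of_nodup _ (PySem.List.nodup_pyRange_one 1 n),
      Aloop n hn n hn le_rfl, units_char n hn]
    have hfe : (PySem.List.pyRange 1 n 1).filter (fun i => decide (i < n → Int.gcd i n = 1))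
        = (PySem.List.pyRange 1 n 1).filter (fun i => decide (Int.gcd i n = 1)) := by
      refine List.filter_congr ?_
      intro i hi
      rw [PySem.List.mem_pyRange_one] at hi
      rw [decide_eq_decide]
      exact ⟨fun h => h hi.2, fun h _ => h⟩
    rw [hfe, ← totals_eq n hn]
    set U := (PySem.List.pyRange 1 n 1).filter (fun i => decide (Int.gcd i n = 1)) with hU
    set T := U.foldl (fun t u => PySem.Int.mod (t * u) n) 1 with hT
    have hnodup : U.Nodup := (PySem.List.nodup_pyRange_one 1 n).filter _
    have hpair : U.Pairwise (· < ·) :=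
      (PySem.List.pairwise_lt_pyRange_one 1 n).filter _
    have hsame : (if T ≠ 1 then (PySem.Set.remove? U T).getD U else U)
        = (if T ≠ 1 then (PySem.List.remove? U T).getD U else U) := by
      by_cases hT1 : T = 1
      · simp [hT1]
      · rw [if_pos hT1, if_pos hT1]
        by_cases hmem : T ∈ U
        · rw [PySem.Set.remove?_of_mem hmem, remove?_nodup U T hnodup hmem]
          rfl
        · rw [(PySem.Set.remove?_eq_none_iff U T).mpr hmem]
          have : PySem.List.remove? U T = none := by
            rw [PySem.List.remove?]
            rw [List.idxOf?_eq_none_iff.mpr hmem]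
            rfl
          rw [this]
      -- both branches produced equal options
    rw [hsame]
    congr 1
    -- sorted of the already increasing survivor list is itself
    set V := (if T ≠ 1 then (PySem.List.remove? U T).getD U else U) with hV
    have hVpair : V.Pairwise (· < ·) := by
      rw [hV]
      by_cases hT1 : T = 1
      · simpa [hT1] using hpair
      · rw [if_pos hT1]
        by_cases hmem : T ∈ U
        · rw [remove?_nodup U T hnodup hmem]
          exact hpair.filter _
        · have : PySem.List.remove? U T = none := by
            rw [PySem.List.remove?, List.idxOf?_eq_none_iff.mpr hmem]
            rfl
          rw [this]
          exact hpair
    rw [List.cons_eq_cons]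
    exact ⟨PySem.List.sorted_eq_self_of_pairwise V _ (hVpair.imp le_of_lt), rfl⟩
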